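-- pv_equiv track=rewrite | github.com/chaeyoun00/algorithm | PGS_brute_2.py | solution
-- ===== SOURCE A (Python) =====
-- def solution(answers):
--     answer = []
--     math = [0, 0, 0]
--     p1 = [1, 2, 3, 4, 5]
--     p2 = [2, 1, 2, 3, 2, 4, 2, 5]
--     p3 = [3, 3, 1, 1, 2, 2, 4, 4, 5, 5]
--
--
--     for i in range(len(answers)):
--         if answers[i] == p1[i % len(p1)]:
--             math[0] = math[0] + 1
--         if answers[i] == p2[i % len(p2)]:
--             math[1] += 1
--         if answers[i] == p3[i % len(p3)]:
--             math[2] += 1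
--
--     if math.count(max(math)) > 1:
--         for i in range(len(math)):
--             if math[i] == max(math):
--                 answer.append(i + 1)
--     else:
--         answer.append(math.index(max(math)) + 1)
--
--     return answer
-- ===== SOURCE B (Python) =====
-- def solution(answers):
--     p1 = [1, 2, 3, 4, 5]
--     p2 = [2, 1, 2, 3, 2, 4, 2, 5]
--     p3 = [3, 3, 1, 1, 2, 2, 4, 4, 5, 5]
--     # All three patterns repeat with period dividing lcm(5, 8, 10) = 40, so one pass
--     # builds a histogram of (position mod 40, given answer); each pattern is then
--     # scored by 40 histogram lookups instead of rescanning the answers.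
--     hist = {}
--     for i, a in enumerate(answers):
--         key = (i % 40, a)
--         hist[key] = hist.get(key, 0) + 1
--     scores = [sum(hist.get((r, p[r % len(p)]), 0) for r in range(40))
--               for p in (p1, p2, p3)]
--     mx = max(scores)
--     return [k + 1 for k in range(3) if scores[k] == mx]
-- ===== Notes on version B (the rewrite author's own statement) =====
-- stated objective: alternative
-- what changed: Instead of comparing each answer against the three cyclic patterns, B builds in one pass a histogram keyed by (position mod 40, answer) (40 = lcm of the pattern periods) and scores each pattern by 40 histogram lookups, then selects winners with one uniform max-filter instead of A's two-branch tie/argmax selector.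
import Mathlib
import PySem

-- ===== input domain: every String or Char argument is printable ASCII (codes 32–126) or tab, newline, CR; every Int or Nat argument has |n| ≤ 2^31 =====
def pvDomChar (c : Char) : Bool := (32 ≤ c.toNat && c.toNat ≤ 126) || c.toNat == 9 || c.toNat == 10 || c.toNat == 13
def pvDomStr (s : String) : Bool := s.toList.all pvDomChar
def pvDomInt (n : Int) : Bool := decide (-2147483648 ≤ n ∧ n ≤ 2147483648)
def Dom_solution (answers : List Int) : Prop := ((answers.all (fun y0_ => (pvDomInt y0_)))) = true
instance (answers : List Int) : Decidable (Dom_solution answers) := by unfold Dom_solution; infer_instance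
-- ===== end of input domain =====

-- B replaces A's per-element comparison against the three cyclic patterns by a one-pass
-- histogram keyed by (position mod 40, answer) — 40 = lcm of the pattern periods — scored
-- by 40 lookups per pattern, and replaces A's two-branch selector by one max-filter.

-- ===== PORT A =====
-- answers[i] is always in range (i ∈ range(len(answers))), so pyGetD with default 0 is exact.
def solution (answers : List Int) : List Int :=
  let p1 : List Int := [1, 2, 3, 4, 5]
  let p2 : List Int := [2, 1, 2, 3, 2, 4, 2, 5]
  let p3 : List Int := [3, 3, 1, 1, 2, 2, 4, 4, 5, 5]
  let math := (PySem.List.pyRange 0 (answers.length : Int) 1).foldl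
    (fun (m : Int × Int × Int) i =>
      let ai := PySem.List.pyGetD answers i 0
      let m0 := if ai = PySem.List.pyGetD p1 (PySem.Int.mod i (p1.length : Int)) 0 then m.1 + 1 else m.1
      let m1 := if ai = PySem.List.pyGetD p2 (PySem.Int.mod i (p2.length : Int)) 0 then m.2.1 + 1 else m.2.1
      let m2 := if ai = PySem.List.pyGetD p3 (PySem.Int.mod i (p3.length : Int)) 0 then m.2.2 + 1 else m.2.2
      (m0, m1, m2)) (0, 0, 0)
  let mathL := [math.1, math.2.1, math.2.2]
  let mx := (PySem.List.max? mathL (fun y => y)).getD 0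
  if PySem.List.count mathL mx > 1 then
    (PySem.List.pyRange 0 (mathL.length : Int) 1).foldl
      (fun (ans : List Int) i =>
        if PySem.List.pyGetD mathL i 0 = mx then ans ++ [i + 1] else ans) []
  else
    -- mx ∈ mathL, so index? is some; getD 0 is exact
    [((PySem.List.index? mathL mx).getD 0 : Int) + 1]

-- ===== PORT B =====
-- hist[key] = hist.get(key, 0) + 1 over enumerate(answers); keys are (i % 40, a)
def histogram (answers : List Int) : PySem.Dict (Int × Int) Int :=
  (PySem.List.enumerate answers 0).foldl
    (fun d ia => d.insert (PySem.Int.mod ia.1 40, ia.2)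
      (d.getD (PySem.Int.mod ia.1 40, ia.2) 0 + 1)) PySem.Dict.empty

-- sum(hist.get((r, p[r % len(p)]), 0) for r in range(40))
def scorePattern (h : PySem.Dict (Int × Int) Int) (p : List Int) : Int :=
  ((PySem.List.pyRange 0 40 1).map
    (fun r => h.getD (r, PySem.List.pyGetD p (PySem.Int.mod r (p.length : Int)) 0) 0)).sum

def solution_alt (answers : List Int) : List Int :=
  let p1 : List Int := [1, 2, 3, 4, 5]
  let p2 : List Int := [2, 1, 2, 3, 2, 4, 2, 5]
  let p3 : List Int := [3, 3, 1, 1, 2, 2, 4, 4, 5, 5]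
  let hist := histogram answers
  let scores := [p1, p2, p3].map (scorePattern hist)
  let mx := (PySem.List.max? scores (fun y => y)).getD 0
  ((PySem.List.pyRange 0 3 1).filter (fun k => PySem.List.pyGetD scores k 0 = mx)).map (fun k => k + 1)

-- ===== PRECONDITION & SPEC =====
def Spec_solution (answers : List Int) (out : List Int) : Prop := out = solution_alt answers
instance (answers : List Int) (out : List Int) : Decidable (Spec_solution answers out) := by unfold Spec_solution; infer_instance

-- ===== CLAIM (what is proved, stated in full; the proofs are below) =====
def Claim_equal_solution : Prop := ∀ (answers : List Int), Dom_solution answers → Spec_solution answers (solution answers)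

-- ===== LEMMAS AND PROOFS =====

-- A's single loop over three independent counters splits into three counting loops.
theorem fold_split (P Q R : Int → Prop) [DecidablePred P] [DecidablePred Q] [DecidablePred R]
    (l : List Int) (a b c : Int) :
    (l.foldl (fun (m : Int × Int × Int) i =>
      ((if P i then m.1 + 1 else m.1),
       (if Q i then m.2.1 + 1 else m.2.1),
       (if R i then m.2.2 + 1 else m.2.2))) (a, b, c)) =
    (l.foldl (fun x i => if P i then x + 1 else x) a,
     l.foldl (fun x i => if Q i then x + 1 else x) b,
     l.foldl (fun x i => if R i then x + 1 else x) c) := by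
  induction l generalizing a b c with
  | nil => rfl
  | cons h t ih => simp only [List.foldl_cons]; exact ih _ _ _

-- a 0/1 indicator summed over a Nodup list containing m picks out exactly the term at m
theorem point_sum (R : List Int) (hR : R.Nodup) (m b : Int) (hm : m ∈ R) (f : Int → Int) :
    (R.map (fun r => if (m, b) = (r, f r) then (1 : Int) else 0)).sum
      = if b = f m then 1 else 0 := by
  induction R with
  | nil => cases hm
  | cons h t ih =>
    simp only [List.map_cons, List.sum_cons]
    rcases List.mem_cons.mp hm with rfl | hmt
    · have hnt : m ∉ t := (List.nodup_cons.mp hR).1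
      have hzero : (t.map (fun r => if (m, b) = (r, f r) then (1 : Int) else 0)).sum = 0 := by
        rw [List.sum_eq_zero]
        intro x hx
        rcases List.mem_map.mp hx with ⟨r, hr, rfl⟩
        have : ¬ ((m, b) = (r, f r)) := by
          intro he; exact hnt (by cases he; exact hr)
        simp [this]
      rw [hzero]
      by_cases hb : b = f m <;> simp [hb, Prod.ext_iff]
    · have hmh : m ≠ h := by
        rintro rfl; exact (List.nodup_cons.mp hR).1 hmt
      rw [ih (List.nodup_cons.mp hR).2 hmt]
      have : ¬ ((m, b) = (h, f h)) := by
        intro he; exact hmh (congrArg Prod.fst he)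
      simp [this]

theorem pyRange40_nodup : (PySem.List.pyRange 0 40 1).Nodup := by decide

-- summing per-residue counts of the (i % 40, g i) keys over all 40 residues
-- counts exactly the elements whose value matches the pattern at their residue
theorem residue_count (f g : Int → Int) (l : List Int) (hl : ∀ j ∈ l, 0 ≤ j) :
    ((PySem.List.pyRange 0 40 1).map
      (fun r => ((l.map (fun j => (PySem.Int.mod j 40, g j))).count (r, f r) : Int))).sum
    = (l.countP (fun j => decide (g j = f (PySem.Int.mod j 40))) : Int) := by
  induction l with
  | nil => simp
  | cons j t ih =>
    have ht : ∀ x ∈ t, 0 ≤ x := fun x hx => hl x (List.mem_cons_of_mem _ hx)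
    have hj : 0 ≤ j := hl j (List.mem_cons_self ..)
    have hmem : PySem.Int.mod j 40 ∈ PySem.List.pyRange 0 40 1 := by
      rw [PySem.List.mem_pyRange_one]
      exact ⟨PySem.Int.mod_nonneg j (by norm_num), PySem.Int.mod_lt j (by norm_num)⟩
    have hstep : ((PySem.List.pyRange 0 40 1).map
        (fun r => ((((PySem.Int.mod j 40, g j) :: t.map (fun j => (PySem.Int.mod j 40, g j))).count (r, f r) : Nat) : Int))).sum
        = ((PySem.List.pyRange 0 40 1).map
            (fun r => ((t.map (fun j => (PySem.Int.mod j 40, g j))).count (r, f r) : Int))).sum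
          + ((PySem.List.pyRange 0 40 1).map
            (fun r => if ((PySem.Int.mod j 40, g j) : Int × Int) = (r, f r) then (1 : Int) else 0)).sum := by
      rw [← PySem.List.sum_map_add_int]
      apply congrArg List.sum
      apply List.map_congr_left
      intro r _
      rw [List.count_cons]
      push_cast
      congr 1
      by_cases h : ((PySem.Int.mod j 40, g j) : Int × Int) = (r, f r)
      · simp [h.symm]
      · simp
    simp only [List.map_cons]
    rw [hstep, ih ht, point_sum _ pyRange40_nodup _ _ hmem f, List.countP_cons]
    by_cases hgj : g j = f (PySem.Int.mod j 40) <;> push_cast <;> simp [hgj]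

-- B's histogram lookup is a count of the key list
theorem hist_aux (l : List (Int × Int)) (d : PySem.Dict (Int × Int) Int) (v : Int × Int) :
    (l.foldl (fun d ia => d.insert (PySem.Int.mod ia.1 40, ia.2)
        (d.getD (PySem.Int.mod ia.1 40, ia.2) 0 + 1)) d).getD v 0
      = d.getD v 0 + ((l.map (fun ia => (PySem.Int.mod ia.1 40, ia.2))).count v : Int) := by
  induction l generalizing d with
  | nil => simp
  | cons ia t ih =>
    simp only [List.foldl_cons, List.map_cons, List.count_cons, beq_iff_eq]
    rw [ih, PySem.Dict.getD_insert]
    by_cases h : v = (PySem.Int.mod ia.1 40, ia.2)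
    · rw [if_pos h, h, if_pos rfl]; push_cast; ring
    · rw [if_neg h, if_neg (show ¬ ((PySem.Int.mod ia.1 40, ia.2) = v) from fun e => h e.symm)]
      push_cast; ring

theorem histogram_getD (answers : List Int) (v : Int × Int) :
    (histogram answers).getD v 0
      = (((PySem.List.enumerate answers 0).map
          (fun ia => (PySem.Int.mod ia.1 40, ia.2))).count v : Int) := by
  unfold histogram
  simpa using hist_aux (PySem.List.enumerate answers 0) PySem.Dict.empty v

-- B's score of a pattern whose period divides 40 is A's match count
theorem score_eq (answers p : List Int) (hp : p.length ≠ 0) (hd : (p.length : Int) ∣ 40) :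
    scorePattern (histogram answers) p
      = ((PySem.List.pyRange 0 (answers.length : Int) 1).countP
          (fun j => decide (PySem.List.pyGetD answers j 0
            = PySem.List.pyGetD p (PySem.Int.mod j (p.length : Int)) 0)) : Int) := by
  unfold scorePattern
  simp only [histogram_getD]
  rw [PySem.List.enumerate_eq_map_pyRange (d := 0)]
  simp only [List.map_map, Function.comp_def, PySem.List.len]
  have hpos : (0 : Int) < (p.length : Int) := by
    exact_mod_cast Nat.pos_of_ne_zero hp
  have hlnn : ∀ j ∈ PySem.List.pyRange 0 (answers.length : Int) 1, 0 ≤ j := by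
    intro j hj
    exact (PySem.List.mem_pyRange_one.mp hj).1
  rw [residue_count (fun r => PySem.List.pyGetD p (PySem.Int.mod r (p.length : Int)) 0)
      (fun j => PySem.List.pyGetD answers j 0) _ hlnn]
  congr 1
  apply List.countP_congr
  intro j hj
  have hm : PySem.Int.mod (j % 40) (p.length : Int) = PySem.Int.mod j (p.length : Int) := by
    rw [PySem.Int.mod_eq_emod_of_pos hpos, PySem.Int.mod_eq_emod_of_pos hpos]
    exact Int.emod_emod_of_dvd j hd
  simp [hm]

-- list.index on a three-element list, unfolded
theorem idx3 (a b c v : Int) :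
    List.idxOf? v [a, b, c] =
      if a = v then some 0 else if b = v then some 1 else if c = v then some 2 else none := by
  simp only [List.idxOf?, List.findIdx?, List.findIdx?.go, beq_iff_eq]

-- A's two-branch selector equals B's max-filter on a three-element score list
theorem sel_eq (x y z : Int) :
    (let mathL : List Int := [x, y, z]
     let mx := (PySem.List.max? mathL (fun y => y)).getD 0
     if PySem.List.count mathL mx > 1 then
       (PySem.List.pyRange 0 (mathL.length : Int) 1).foldl
         (fun (ans : List Int) i =>
           if PySem.List.pyGetD mathL i 0 = mx then ans ++ [i + 1] else ans) []
     else [((PySem.List.index? mathL mx).getD 0 : Int) + 1])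
    = (let mx := (PySem.List.max? [x, y, z] (fun y => y)).getD 0
       ((PySem.List.pyRange 0 3 1).filter (fun i => PySem.List.pyGetD [x, y, z] i 0 = mx)).map (fun i => i + 1)) := by
  have hr : PySem.List.pyRange 0 3 1 = [0, 1, 2] := by decide
  simp [PySem.List.count, idx3, PySem.List.pyGetD, PySem.List.pyGet?,
    PySem.List.pyIdx?, PySem.List.max?_id_cons, hr, List.filter_cons, List.count_cons, List.count_nil]
  obtain ⟨m, hgen, hbx, hby, hbz, hd⟩ :
      ∃ m, max x (max y z) = m ∧ x ≤ m ∧ y ≤ m ∧ z ≤ m ∧ (x = m ∨ y = m ∨ z = m) :=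
    ⟨max x (max y z), rfl, by omega, by omega, by omega, by omega⟩
  rw [hgen]
  clear hgen
  have h5 : (y ≤ x ∧ z ≤ x) ↔ x = m := by omega
  by_cases h1 : x = m <;> by_cases h2 : y = m <;> by_cases h3 : z = m <;>
    simp [h5, h1, h2, h3]
  all_goals try omega
  all_goals (split_ifs <;> (try simp) <;> (try omega))

-- ===== VERDICT (by name: the statement is the Claim_ definition above) =====
theorem solution_spec : Claim_equal_solution := by
  intro answers _
  unfold Spec_solution solution solution_alt
  simp only []
  rw [fold_split (fun i => PySem.List.pyGetD answers i 0 = PySem.List.pyGetD [1,2,3,4,5] (PySem.Int.mod i (([1,2,3,4,5] : List Int).length : Int)) 0)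
        (fun i => PySem.List.pyGetD answers i 0 = PySem.List.pyGetD [2,1,2,3,2,4,2,5] (PySem.Int.mod i (([2,1,2,3,2,4,2,5] : List Int).length : Int)) 0)
        (fun i => PySem.List.pyGetD answers i 0 = PySem.List.pyGetD [3,3,1,1,2,2,4,4,5,5] (PySem.Int.mod i (([3,3,1,1,2,2,4,4,5,5] : List Int).length : Int)) 0)]
  rw [PySem.List.foldl_ite_add_one, PySem.List.foldl_ite_add_one, PySem.List.foldl_ite_add_one]
  simp only [List.map_cons, List.map_nil, zero_add]
  simp only [score_eq answers [1,2,3,4,5] (by decide) (by decide),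
      score_eq answers [2,1,2,3,2,4,2,5] (by decide) (by decide),
      score_eq answers [3,3,1,1,2,2,4,4,5,5] (by decide) (by decide)]
  exact sel_eq _ _ _
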